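-- pv_equiv track=rewrite | github.com/mindungil/customui-jb | backend/open_webui/routers/audio_jy.py | filter_repetitive_text
-- ===== SOURCE A (Python) =====
-- def filter_repetitive_text(text, min_repeat=3, max_repeat_ratio=0.7):
--     """
--     반복되는 텍스트를 필터링하는 함수
--     - min_repeat: 연속 반복 최소 횟수
--     - max_repeat_ratio: 전체 텍스트에서 반복 부분이 차지하는 최대 비율
--     """
--     if not text or len(text.strip()) == 0:
--         return ""
--
--     words = text.split()
--     if len(words) < min_repeat:
--         return text
--
--     # 1. 연속된 동일 단어 제거
--     filtered_words = []
--     prev_word = None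
--     repeat_count = 0
--
--     for word in words:
--         if word == prev_word:
--             repeat_count += 1
--             if repeat_count < min_repeat:  # 3번까지는 허용
--                 filtered_words.append(word)
--         else:
--             filtered_words.append(word)
--             repeat_count = 0
--         prev_word = word
--
--     # 2. 전체 텍스트가 반복으로만 이루어져 있는지 확인
--     filtered_text = " ".join(filtered_words)
--     unique_words = set(filtered_words)
--
--     # 고유 단어가 너무 적으면 (반복이 심하면) 대표 문구만 남김
--     if len(unique_words) <= 3 and len(filtered_words) > 10:
--         # 가장 흔한 단어 조합 찾기
--         from collections import Counter
--         word_pairs = [f"{filtered_words[i]} {filtered_words[i+1]}"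
--                      for i in range(len(filtered_words)-1)]
--         most_common = Counter(word_pairs).most_common(1)
--
--         if most_common and most_common[0][1] > len(filtered_words) * 0.3:
--             return most_common[0][0]  # 가장 흔한 조합만 반환
--
--     return filtered_text
-- ===== SOURCE B (Python) =====
-- def filter_repetitive_text(text, min_repeat=3, max_repeat_ratio=0.7):
--     if not text or len(text.strip()) == 0:
--         return ""
--
--     words = text.split()
--     if len(words) < min_repeat:
--         return text
--
--     # 1. run-length encode, then expand each run capped at max(min_repeat, 1) copies
--     runs = []
--     for w in words:
--         if runs and runs[-1][0] == w:
--             runs[-1][1] += 1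
--         else:
--             runs.append([w, 1])
--     cap = max(min_repeat, 1)
--     filtered_words = []
--     for w, c in runs:
--         filtered_words.extend([w] * min(c, cap))
--
--     filtered_text = " ".join(filtered_words)
--
--     # 2. if almost fully repetitive, keep only the dominant adjacent word pair
--     if len(set(filtered_words)) <= 3 and len(filtered_words) > 10:
--         counts = {}
--         for a, b in zip(filtered_words, filtered_words[1:]):
--             pair = a + " " + b
--             counts[pair] = counts.get(pair, 0) + 1
--         best_pair, best_count = max(counts.items(), key=lambda kv: kv[1])
--         if best_count > len(filtered_words) * 0.3:
--             return best_pair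
--
--     return filtered_text
-- ===== Notes on version B (the rewrite author's own statement) =====
-- stated objective: alternative
-- what changed: The prev_word/repeat_count state machine is replaced by a run-length encoding pass followed by a capped expansion of each run, and Counter(index-built pair strings).most_common(1) is replaced by a plain dict counted over zip-adjacent pairs with max(key=count); the early guards and the set-size check are unchanged.
import Mathlib
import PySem

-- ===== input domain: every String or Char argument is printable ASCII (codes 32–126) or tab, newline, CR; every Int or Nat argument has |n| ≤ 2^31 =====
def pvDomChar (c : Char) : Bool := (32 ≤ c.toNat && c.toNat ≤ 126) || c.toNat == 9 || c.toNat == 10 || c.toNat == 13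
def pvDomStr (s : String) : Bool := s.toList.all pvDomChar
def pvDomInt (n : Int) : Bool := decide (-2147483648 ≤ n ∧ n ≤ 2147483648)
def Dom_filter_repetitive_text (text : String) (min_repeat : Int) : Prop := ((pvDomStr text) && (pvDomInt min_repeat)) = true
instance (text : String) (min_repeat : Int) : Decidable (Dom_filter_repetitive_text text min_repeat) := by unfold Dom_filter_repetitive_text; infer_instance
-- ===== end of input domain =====

-- B replaces A's prev/repeat_count state machine by run-length encode + capped expand, and the
-- Counter(...).most_common(1) over index-built pair strings by a dict over zip-adjacent pairs with max(key=count)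
-- (objective: alternative decomposition, same cost).
-- In both ports, Python's `count > len(filtered_words) * 0.3` is ported as `10 * count > 3 * len`:
-- the comparisons agree for every list length n since the IEEE double n*0.3 stays within a third of an
-- ulp of the rational 3n/10, so no integer ever separates them.

-- ===== PORT A =====
-- one step of A's for-loop; state = (filtered_words, prev_word, repeat_count)
def pvAStep (min_repeat : Int) : List String × Option String × Int → String → List String × Option String × Int
  | (filtered, prev, cnt), w =>
    if prev = some w then
      let cnt' := cnt + 1
      (if cnt' < min_repeat then filtered ++ [w] else filtered, some w, cnt')
    else
      (filtered ++ [w], some w, 0)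

-- Counter(xs).most_common(1): heapq.nlargest(1, …) = first element with maximal count, as a ≤1-element list
def pvMostCommon1 (items : List (String × Int)) : List (String × Int) :=
  match items with
  | [] => []
  | x :: rest => [rest.foldl (fun best p => if best.2 < p.2 then p else best) x]

-- A's code from "filtered_text = ..." on, as a function of min_repeat and filtered_words
def pvAPhase2 (min_repeat : Int) (filtered_words : List String) : String :=
  -- (min_repeat is unused here: A's phase 2 never reads it)
  let filtered_text := PySem.Str.join " " filtered_words
  if PySem.Set.len (PySem.Set.ofList filtered_words) ≤ 3 ∧ (filtered_words.length : Int) > 10 then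
    -- f"{a} {b}" = " ".join of the two words
    let word_pairs := (PySem.List.pyRange 0 ((filtered_words.length : Int) - 1) 1).map
      (fun i => PySem.Str.join " " [PySem.List.pyGetD filtered_words i "", PySem.List.pyGetD filtered_words (i + 1) ""])
    match pvMostCommon1 (PySem.Dict.counter word_pairs).items with
    | [] => filtered_text
    | mc :: _ => if 10 * mc.2 > 3 * (filtered_words.length : Int) then mc.1 else filtered_text
  else filtered_text

def filter_repetitive_text (text : String) (min_repeat : Int) : String :=
  if text = "" ∨ PySem.Str.len (PySem.Str.strip text) = 0 then ""
  else
    let words := PySem.Str.split₀ text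
    if (words.length : Int) < min_repeat then text
    else
      pvAPhase2 min_repeat (words.foldl (pvAStep min_repeat) ([], none, 0)).1

-- ===== PORT B =====
-- one step of B's run-length-encoding loop (mutating runs[-1][1] += 1 = rebuild the last cell)
def pvRunStep (runs : List (String × Int)) (w : String) : List (String × Int) :=
  match runs.getLast? with
  | some (v, c) => if v = w then runs.dropLast ++ [(w, c + 1)] else runs ++ [(w, 1)]
  | none => runs ++ [(w, 1)]

-- B's loop `for w, c in runs: filtered_words.extend([w] * min(c, cap))`
def pvExpand (cap : Int) (runs : List (String × Int)) : List String :=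
  runs.foldl (fun acc r => acc ++ List.replicate (min r.2 cap).toNat r.1) []

-- B's code from "filtered_text = ..." on, as a function of filtered_words
def pvBPhase2 (filtered_words : List String) : String :=
  let filtered_text := PySem.Str.join " " filtered_words
  if PySem.Set.len (PySem.Set.ofList filtered_words) ≤ 3 ∧ (filtered_words.length : Int) > 10 then
    let counts := (filtered_words.zip (filtered_words.drop 1)).foldl
      (fun d ab =>
        let pair := PySem.Str.join " " [ab.1, ab.2]
        d.insert pair (d.getD pair 0 + 1)) PySem.Dict.empty
    match PySem.List.max? counts.items (fun kv => kv.2) with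
    | some best => if 10 * best.2 > 3 * (filtered_words.length : Int) then best.1 else filtered_text
    | none => filtered_text  -- unreachable: counts is nonempty whenever filtered_words has > 10 elements
  else filtered_text

def filter_repetitive_text_alt (text : String) (min_repeat : Int) : String :=
  if text = "" ∨ PySem.Str.len (PySem.Str.strip text) = 0 then ""
  else
    let words := PySem.Str.split₀ text
    if (words.length : Int) < min_repeat then text
    else
      let runs := words.foldl pvRunStep []
      pvBPhase2 (pvExpand (max min_repeat 1) runs)

-- ===== PRECONDITION & SPEC =====
def Spec_filter_repetitive_text (text : String) (min_repeat : Int) (out : String) : Prop := out = filter_repetitive_text_alt text min_repeat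
instance (text : String) (min_repeat : Int) (out : String) : Decidable (Spec_filter_repetitive_text text min_repeat out) := by unfold Spec_filter_repetitive_text; infer_instance

-- ===== CLAIM (what is proved, stated in full; the proofs are below) =====
def Claim_equal_filter_repetitive_text : Prop := ∀ (text : String) (min_repeat : Int), Dom_filter_repetitive_text text min_repeat → Spec_filter_repetitive_text text min_repeat (filter_repetitive_text text min_repeat)

-- ===== LEMMAS AND PROOFS =====

-- expanding runs distributes over appending one run
theorem pvExpand_append (cap : Int) (rs : List (String × Int)) (p : String × Int) :
    pvExpand cap (rs ++ [p]) = pvExpand cap rs ++ List.replicate (min p.2 cap).toNat p.1 := by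
  simp [pvExpand, List.foldl_append]

-- the run-count arithmetic behind one more repetition of the current word
theorem pvReplicate_bump (m c : Int) (hc : 1 ≤ c) (w : String) :
    List.replicate (min (c + 1) (max m 1)).toNat w
      = List.replicate (min c (max m 1)).toNat w ++ (if c < m then [w] else []) := by
  by_cases h : c < m
  · have hn : (min (c + 1) (max m 1)).toNat = (min c (max m 1)).toNat + 1 := by omega
    rw [hn, List.replicate_succ']
    simp [h]
  · have hn : (min (c + 1) (max m 1)).toNat = (min c (max m 1)).toNat := by omega
    rw [hn]
    simp [h]

-- MAIN INVARIANT: A's state machine, run already open with word w of length c, equals B's RLE + expand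
theorem pvPhase1_inv (m : Int) (rest : List String) :
    ∀ (runs : List (String × Int)) (w : String) (c : Int), 1 ≤ c →
    (rest.foldl (pvAStep m) (pvExpand (max m 1) (runs ++ [(w, c)]), some w, c - 1)).1
      = pvExpand (max m 1) (rest.foldl pvRunStep (runs ++ [(w, c)])) := by
  induction rest with
  | nil => intro runs w c hc; rfl
  | cons x rest ih =>
    intro runs w c hc
    simp only [List.foldl]
    by_cases hwx : w = x
    · subst hwx
      have hstep : pvAStep m (pvExpand (max m 1) (runs ++ [(w, c)]), some w, c - 1) w
          = (pvExpand (max m 1) (runs ++ [(w, c + 1)]), some w, (c + 1) - 1) := by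
        simp only [pvAStep]
        have h1 : c - 1 + 1 = c := by omega
        rw [h1, pvExpand_append, pvExpand_append, pvReplicate_bump m c hc]
        by_cases h : c < m
        · simp [h, List.append_assoc]
        · simp [h]
      have hrun : pvRunStep (runs ++ [(w, c)]) w = runs ++ [(w, c + 1)] := by
        simp [pvRunStep]
      rw [hstep, hrun]
      exact ih runs w (c + 1) (by omega)
    · have hstep : pvAStep m (pvExpand (max m 1) (runs ++ [(w, c)]), some w, c - 1) x
          = (pvExpand (max m 1) ((runs ++ [(w, c)]) ++ [(x, 1)]), some x, 1 - 1) := by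
        have hne : ¬ ((some w : Option String) = some x) := by simpa using hwx
        simp only [pvAStep, if_neg hne]
        rw [pvExpand_append (max m 1) (runs ++ [(w, c)]) (x, 1)]
        have h1 : (min ((1 : Int)) (max m 1)).toNat = 1 := by omega
        rw [h1]
        simp
      have hrun : pvRunStep (runs ++ [(w, c)]) x = (runs ++ [(w, c)]) ++ [(x, 1)] := by
        simp [pvRunStep, hwx]
      rw [hstep, hrun]
      exact ih (runs ++ [(w, c)]) x 1 (by omega)

theorem pvPhase1 (m : Int) (words : List String) :
    (words.foldl (pvAStep m) ([], none, 0)).1 = pvExpand (max m 1) (words.foldl pvRunStep []) := by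
  cases words with
  | nil => rfl
  | cons w ws =>
    simp only [List.foldl]
    have hstep : pvAStep m ([], none, 0) w = (pvExpand (max m 1) ([] ++ [(w, 1)]), some w, 1 - 1) := by
      simp only [pvAStep, if_neg (by simp : ¬ ((none : Option String) = some w))]
      rw [show (pvExpand (max m 1) ([] ++ [(w, 1)])) = [w] by simp [pvExpand]]
      simp
    have hrun : pvRunStep [] w = [] ++ [(w, 1)] := by simp [pvRunStep]
    rw [hstep, hrun]
    exact pvPhase1_inv m ws [] w 1 (by omega)

-- A's index-built pair strings = B's zip-built pair strings
theorem pvPairs_eq (fw : List String) :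
    (PySem.List.pyRange 0 ((fw.length : Int) - 1) 1).map
        (fun i => PySem.Str.join " " [PySem.List.pyGetD fw i "", PySem.List.pyGetD fw (i + 1) ""])
      = (fw.zip (fw.drop 1)).map (fun ab => PySem.Str.join " " [ab.1, ab.2]) := by
  cases fw with
  | nil => decide
  | cons a l =>
    have hl : (((a :: l).length : Nat) : Int) - 1 = ((l.length : Nat) : Int) := by
      push_cast [List.length_cons]; ring
    rw [hl, PySem.List.pyRange_zero_natCast, List.map_map]
    apply List.ext_getElem
    · simp
    · intro i h1 h2
      have hi : i < l.length := by simpa using h1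
      simp only [List.getElem_map, List.getElem_range, Function.comp_apply, List.drop_succ_cons,
        List.drop_zero, List.getElem_zip]
      have e1 : PySem.List.pyGetD (a :: l) ((i : Nat) : Int) "" = (a :: l)[i]'(by simp; omega) := by
        rw [PySem.List.pyGetD_natCast]
        exact List.getD_eq_getElem _ _ _
      have e2 : PySem.List.pyGetD (a :: l) (((i : Nat) : Int) + 1) "" = l[i] := by
        have hc : (((i : Nat) : Int) + 1) = (((i + 1 : Nat)) : Int) := by push_cast; ring
        rw [hc, PySem.List.pyGetD_natCast]
        have := List.getD_eq_getElem (a :: l) "" (n := i + 1) (hn := by simp; omega)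
        rw [this, List.getElem_cons_succ]
      rw [e1, e2]

-- first-maximal fold = PySem.List.max? on a cons
theorem pvMax_eq (x : String × Int) (rest : List (String × Int)) :
    PySem.List.max? (x :: rest) (fun kv => kv.2)
      = some (rest.foldl (fun best p => if best.2 < p.2 then p else best) x) := by
  show List.foldl _ (some x) rest = _
  induction rest generalizing x with
  | nil => rfl
  | cons p rest ih =>
    simp only [List.foldl]
    rw [← ih]
    by_cases h : x.2 < p.2 <;> simp [h]

theorem pvSelect_eq (ft : String) (n : Int) (its1 its2 : List (String × Int)) (h : its1 = its2) :
    (match pvMostCommon1 its1 with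
      | [] => ft
      | mc :: _ => if 10 * mc.2 > 3 * n then mc.1 else ft)
    = (match PySem.List.max? its2 (fun kv => kv.2) with
      | some best => if 10 * best.2 > 3 * n then best.1 else ft
      | none => ft) := by
  subst h
  cases its1 with
  | nil => rfl
  | cons x rest => rw [pvMax_eq]; simp [pvMostCommon1]

theorem pvPhase2_eq (m : Int) (fw : List String) : pvAPhase2 m fw = pvBPhase2 fw := by
  unfold pvAPhase2 pvBPhase2
  dsimp only
  split
  · refine pvSelect_eq _ _ _ _ ?_
    have hd : PySem.Dict.counter ((PySem.List.pyRange 0 ((fw.length : Int) - 1) 1).map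
          (fun i => PySem.Str.join " " [PySem.List.pyGetD fw i "", PySem.List.pyGetD fw (i + 1) ""]))
        = (fw.zip (fw.drop 1)).foldl
          (fun d ab =>
            let pair := PySem.Str.join " " [ab.1, ab.2]
            d.insert pair (d.getD pair 0 + 1)) PySem.Dict.empty := by
      rw [pvPairs_eq, ← PySem.Dict.foldl_insert_getD_add_one_eq_counter, List.foldl_map]
    rw [hd]
  · rfl

-- ===== VERDICT (by name: the statement is the Claim_ definition above) =====
theorem filter_repetitive_text_spec : Claim_equal_filter_repetitive_text := by
  intro text m _
  unfold Spec_filter_repetitive_text filter_repetitive_text filter_repetitive_text_alt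
  split
  · rfl
  · dsimp only
    split
    · rfl
    · rw [pvPhase1, pvPhase2_eq]
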